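-- pv_equiv track=rewrite | github.com/Kxuan/foobar | solution.py | calc_radius
-- ===== SOURCE A (Python) =====
-- def calc_radius(length):
--     neg = False
--     sum = 0
--
--     for l in length[::-1]:
--         if not neg:
--             sum += l
--         else:
--             sum -= l
--         neg = not neg
--
--     if neg:
--         return sum * 2, 3
--     else:
--         return -sum * 2, 1
-- ===== SOURCE B (Python) =====
-- def calc_radius(length):
--     # Forward pairwise pass: no reversal, no sign toggle.
--     t = 0
--     i = 0
--     n = len(length)
--     while i + 1 < n:
--         t += length[i] - length[i + 1]
--         i += 2
--     if i < n:
--         return (t + length[i]) * 2, 3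
--     return t * 2, 1
-- ===== Notes on version B (the rewrite author's own statement) =====
-- stated objective: alternative
-- what changed: Replaces the reversed-iteration sign-toggle loop with a single forward pass consuming elements in pairs (adding a-b per pair); the leftover element decides the tag, so no reversal and no toggled state are needed.
import Mathlib
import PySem

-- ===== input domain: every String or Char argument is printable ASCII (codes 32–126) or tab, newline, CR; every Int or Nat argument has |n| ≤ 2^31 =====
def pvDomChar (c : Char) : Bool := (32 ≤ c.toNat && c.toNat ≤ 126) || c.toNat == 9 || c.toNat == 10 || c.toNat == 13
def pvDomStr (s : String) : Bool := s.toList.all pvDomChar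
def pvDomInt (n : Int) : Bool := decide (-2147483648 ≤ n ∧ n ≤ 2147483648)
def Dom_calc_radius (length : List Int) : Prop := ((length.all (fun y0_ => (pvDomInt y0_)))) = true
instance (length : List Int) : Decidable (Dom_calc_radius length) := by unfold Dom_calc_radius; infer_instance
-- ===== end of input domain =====

-- B replaces the reversed sign-toggle loop by one forward pairwise pass (alternative decomposition, same cost).
-- ===== PORT A =====
def calc_radius (length : List Int) : Int × Int :=
  let rev := (PySem.List.slice? length none none (-1)).getD []
  let st := rev.foldl (fun (st : Bool × Int) l =>
      (!st.1, if !st.1 then st.2 + l else st.2 - l)) (false, 0)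
  if st.1 then (st.2 * 2, 3) else (-st.2 * 2, 1)

-- ===== PORT B =====
def pvPairLoop (t : Int) : List Int → Int × Int
  | a :: b :: rest => pvPairLoop (t + a - b) rest
  | [a] => ((t + a) * 2, 3)
  | [] => (t * 2, 1)

def calc_radius_alt (length : List Int) : Int × Int := pvPairLoop 0 length

-- ===== PRECONDITION & SPEC =====
def Spec_calc_radius (length : List Int) (out : Int × Int) : Prop := out = calc_radius_alt length
instance (length : List Int) (out : Int × Int) : Decidable (Spec_calc_radius length out) := by unfold Spec_calc_radius; infer_instance

-- ===== CLAIM (what is proved, stated in full; the proofs are below) =====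
def Claim_equal_calc_radius : Prop := ∀ (length : List Int), Dom_calc_radius length → Spec_calc_radius length (calc_radius length)

-- ===== LEMMAS AND PROOFS =====
theorem pvPairLoop_foldr (l : List Int) (t : Int) :
    pvPairLoop t l =
      (let st := l.foldr (fun x (st : Bool × Int) =>
          (!st.1, if !st.1 then st.2 + x else st.2 - x)) (false, 0)
       if st.1 then ((t + st.2) * 2, 3) else ((t - st.2) * 2, 1)) := by
  induction t, l using pvPairLoop.induct with
  | case1 t a b rest ih =>
      simp only [pvPairLoop, List.foldr, ih]
      rcases rest.foldr (fun x (st : Bool × Int) =>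
          (!st.1, if !st.1 then st.2 + x else st.2 - x)) (false, 0) with ⟨neg, s⟩
      cases neg <;> simp <;> ring_nf
  | case2 t a => simp [pvPairLoop, List.foldr]
  | case3 t => simp [pvPairLoop, List.foldr]

-- ===== VERDICT (by name: the statement is the Claim_ definition above) =====
theorem calc_radius_spec : Claim_equal_calc_radius := by
  intro l _
  show calc_radius l = calc_radius_alt l
  unfold calc_radius calc_radius_alt
  rw [PySem.List.slice?_none_none_neg_one]
  simp only [Option.getD_some, List.foldl_reverse, pvPairLoop_foldr]
  rcases l.foldr (fun x (st : Bool × Int) =>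
      (!st.1, if !st.1 then st.2 + x else st.2 - x)) (false, 0) with ⟨neg, s⟩
  cases neg <;> simp
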